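-- pv_equiv track=rewrite | github.com/AnchalNigam/Code-Time | binarysearch/peak_element.py | solve
-- ===== SOURCE A (Python) =====
-- def solve(A):
--   n = len(A) -1
--   peak = A[0]
--   for idx in range(1, n):
--     if A[idx] > A[idx+1] and A[idx] > A[idx-1]:
--       peak = A[idx]
--   if peak < A[n]:
--     return A[n]
--   return peak
-- ===== SOURCE B (Python) =====
-- def solve(A):
--     n = len(A) - 1
--     peak = A[0]
--     for idx in range(n - 1, 0, -1):
--         if A[idx] > A[idx + 1] and A[idx] > A[idx - 1]:
--             peak = A[idx]
--             break
--     if peak < A[n]: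
--         return A[n]
--     return peak
-- ===== Notes on version B (the rewrite author's own statement) =====
-- stated objective: alternative
-- what changed: B finds the rightmost interior local maximum by scanning from the right and stopping at the first hit, instead of A's full left-to-right sweep that overwrites the candidate on every hit.
import Mathlib
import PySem

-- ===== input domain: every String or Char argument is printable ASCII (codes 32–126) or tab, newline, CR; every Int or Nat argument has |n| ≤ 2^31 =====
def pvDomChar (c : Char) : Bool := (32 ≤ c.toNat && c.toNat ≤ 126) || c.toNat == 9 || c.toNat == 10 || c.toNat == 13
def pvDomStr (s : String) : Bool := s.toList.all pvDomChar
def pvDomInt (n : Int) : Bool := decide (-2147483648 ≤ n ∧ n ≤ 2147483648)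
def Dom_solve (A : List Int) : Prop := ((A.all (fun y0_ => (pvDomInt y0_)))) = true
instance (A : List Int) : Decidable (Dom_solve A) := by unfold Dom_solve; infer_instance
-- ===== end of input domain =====

-- B finds the rightmost interior local maximum by a right-to-left scan with early exit
-- instead of A's full left-to-right overwriting sweep (objective: alternative, same cost).

-- ===== PORT A =====
-- A[i] on an in-range index (guaranteed by Pre_solve); 0 outside Pre_ where Python raises
def pvGet (A : List Int) (i : Int) : Int := (PySem.List.pyGet? A i).getD 0

def solve (A : List Int) : Int :=
  let n : Int := (A.length : Int) - 1
  let peak := (PySem.List.pyRange 1 n 1).foldl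
    (fun p idx => if pvGet A idx > pvGet A (idx+1) ∧ pvGet A idx > pvGet A (idx-1) then pvGet A idx else p)
    (pvGet A 0)
  if peak < pvGet A n then pvGet A n else peak

-- ===== PORT B =====
-- the for-loop with break: return at the first index (scanning right-to-left) that is a local max
def pvScan (A : List Int) : List Int → Int → Int
  | [], p => p
  | idx :: rest, p =>
      if pvGet A idx > pvGet A (idx+1) ∧ pvGet A idx > pvGet A (idx-1) then pvGet A idx
      else pvScan A rest p

def solve_alt (A : List Int) : Int :=
  let n : Int := (A.length : Int) - 1
  let peak := pvScan A (PySem.List.pyRange (n-1) 0 (-1)) (pvGet A 0)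
  if peak < pvGet A n then pvGet A n else peak

-- ===== PRECONDITION & SPEC =====
-- Pre_ excludes only the empty list, on which Python A raises IndexError on its first element access.
def Pre_solve (A : List Int) : Prop := A ≠ []
instance (A : List Int) : Decidable (Pre_solve A) := by unfold Pre_solve; infer_instance
def pvWitness_solve : List Int := [1, 3, 2]

def Spec_solve (A : List Int) (out : Int) : Prop := out = solve_alt A
instance (A : List Int) (out : Int) : Decidable (Spec_solve A out) := by unfold Spec_solve; infer_instance

-- ===== CLAIM (what is proved, stated in full; the proofs are below) =====
def Claim_equal_solve : Prop := ∀ (A : List Int), Dom_solve A → Pre_solve A → Spec_solve A (solve A)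

-- ===== LEMMAS AND PROOFS =====

-- first-hit over a concatenation: scan the left part, falling through to the right part's result
theorem pvScan_append (A : List Int) (l r : List Int) (p : Int) :
    pvScan A (l ++ r) p = pvScan A l (pvScan A r p) := by
  induction l with
  | nil => rfl
  | cons x t ih => simp only [List.cons_append, pvScan]; split <;> simp [ih]

-- first-hit over the REVERSE of l equals a left-to-right overwriting fold over l
theorem pvScan_reverse_eq_foldl (A : List Int) (l : List Int) (p : Int) :
    pvScan A l.reverse p =
      l.foldl (fun q idx => if pvGet A idx > pvGet A (idx+1) ∧ pvGet A idx > pvGet A (idx-1)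
                            then pvGet A idx else q) p := by
  induction l generalizing p with
  | nil => rfl
  | cons x t ih =>
      simp only [List.reverse_cons, pvScan_append, List.foldl_cons, pvScan]
      rw [ih]

theorem solve_spec : Claim_equal_solve := by
  intro A _ _
  unfold Spec_solve solve solve_alt
  simp only [PySem.List.pyRange_neg_one_eq_reverse, pvScan_reverse_eq_foldl]
  norm_num
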